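-- pv_equiv track=rewrite | github.com/4th-front-practice-playground/Min-playground | 4th_project_test/products/models.py | _split_condition_key
-- ===== SOURCE A (Python) =====
-- LOOKUPS = ("gte", "lte", "in", "icontains", "exact")
--
-- def _split_condition_key(key, field_names):
--     for lookup in LOOKUPS:
--         suffix = f"_{lookup}"
--         if key.endswith(suffix):
--             field_name = key[:-len(suffix)]
--             if field_name in field_names:
--                 return field_name, lookup
--             return None, None
--
--     if key in field_names:
--         return key, None
--
--     return None, None
-- ===== SOURCE B (Python) =====
-- LOOKUPS = ("gte", "lte", "in", "icontains", "exact")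
-- _LOOKUP_SET = frozenset(LOOKUPS)
--
-- def _split_condition_key(key, field_names):
--     head, sep, tail = key.rpartition("_")
--     if sep and tail in _LOOKUP_SET:
--         if head in field_names:
--             return head, tail
--         return None, None
--     if key in field_names:
--         return key, None
--     return None, None
-- ===== Notes on version B (the rewrite author's own statement) =====
-- stated objective: simpler
-- what changed: Replaces the loop over the five lookup suffixes with a single rpartition('_') split followed by one set-membership test of the part after the last underscore.
import Mathlib
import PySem

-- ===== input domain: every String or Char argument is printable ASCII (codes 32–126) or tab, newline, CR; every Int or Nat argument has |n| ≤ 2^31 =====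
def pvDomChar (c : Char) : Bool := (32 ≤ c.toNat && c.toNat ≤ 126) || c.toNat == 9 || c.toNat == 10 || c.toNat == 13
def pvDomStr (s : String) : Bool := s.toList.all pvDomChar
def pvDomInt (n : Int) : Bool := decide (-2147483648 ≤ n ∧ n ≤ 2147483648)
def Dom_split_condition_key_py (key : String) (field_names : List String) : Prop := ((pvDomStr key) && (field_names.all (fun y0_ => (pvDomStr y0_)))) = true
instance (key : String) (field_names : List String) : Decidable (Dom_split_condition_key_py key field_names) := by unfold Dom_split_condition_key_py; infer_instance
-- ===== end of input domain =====

-- B replaces A's loop over the five lookup suffixes by one rpartition('_') split plus a set-membership test (objective: simpler).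

-- ===== PORT A =====
def pvLOOKUPS : List String := ["gte", "lte", "in", "icontains", "exact"]
def pvALoop (key : String) (field_names : List String) : List String → Option String × Option String
  | [] =>
      if field_names.contains key then (some key, none) else (none, none)
  | lookup :: rest =>
      let suffix := "_" ++ lookup
      if PySem.Str.endswith key suffix then
        let field_name := PySem.Str.slice key none (some (-(PySem.Str.len suffix : Int)))
        if field_names.contains field_name then (some field_name, some lookup)
        else (none, none)
      else pvALoop key field_names rest
def split_condition_key_py (key : String) (field_names : List String) : Option String × Option String :=
  pvALoop key field_names pvLOOKUPS
def pvLOOKUP_SET : PySem.Set String := PySem.Set.ofList ["gte", "lte", "in", "icontains", "exact"]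
def pvRpartitionUnd (cs : List Char) : List Char × Bool × List Char :=
  let r := cs.reverse
  let t := r.takeWhile (· ≠ '_')
  match r.dropWhile (· ≠ '_') with
  | [] => ([], false, cs)
  | _ :: rest => (rest.reverse, true, t.reverse)
def split_condition_key_py_alt (key : String) (field_names : List String) : Option String × Option String :=
  let p := pvRpartitionUnd key.toList
  let head := String.ofList p.1
  let tail := String.ofList p.2.2
  if p.2.1 && PySem.Set.contains pvLOOKUP_SET tail then
    if field_names.contains head then (some head, some tail) else (none, none)
  else
    if field_names.contains key then (some key, none) else (none, none)

-- ===== PRECONDITION & SPEC =====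
def Spec_split_condition_key_py (key : String) (field_names : List String) (out : Option String × Option String) : Prop := out = split_condition_key_py_alt key field_names
instance (key : String) (field_names : List String) (out : Option String × Option String) : Decidable (Spec_split_condition_key_py key field_names out) := by unfold Spec_split_condition_key_py; infer_instance

-- ===== CLAIM (what is proved, stated in full; the proofs are below) =====
def Claim_equal_split_condition_key_py : Prop := ∀ (key : String) (field_names : List String), Dom_split_condition_key_py key field_names → Spec_split_condition_key_py key field_names (split_condition_key_py key field_names)

-- ===== LEMMAS AND PROOFS =====

theorem tw_app (p : Char → Bool) (l1 l2 : List Char) (h : ∀ a ∈ l1, p a) :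
    (l1 ++ l2).takeWhile p = l1 ++ l2.takeWhile p := by
  induction l1 with
  | nil => simp
  | cons a l ih => simp_all

theorem dw_app (p : Char → Bool) (l1 l2 : List Char) (h : ∀ a ∈ l1, p a) :
    (l1 ++ l2).dropWhile p = l2.dropWhile p := by
  induction l1 with
  | nil => simp
  | cons a l ih => simp_all

theorem dropWhile_head_false {α : Type} (p : α → Bool) (l : List α) (c : α) (ds : List α)
    (h : l.dropWhile p = c :: ds) : p c = false := by
  induction l with
  | nil => simp at h
  | cons a l ih =>
    by_cases hp : p a
    · rw [List.dropWhile_cons_of_pos hp] at h; exact ih h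
    · rw [List.dropWhile_cons_of_neg hp] at h
      cases h; simpa using hp

theorem suffix_iff (cs l : List Char) (hl : ∀ c ∈ l, c ≠ '_') :
    ('_' :: l) <:+ cs ↔
      (cs.reverse.takeWhile (· ≠ '_') = l.reverse ∧ cs.reverse.dropWhile (· ≠ '_') ≠ []) := by
  constructor
  · rintro ⟨pre, rfl⟩
    have hall : ∀ a ∈ l.reverse, (fun c => decide (c ≠ '_')) a = true := by
      intro a ha; simp at ha ⊢; exact hl a ha
    constructor
    · rw [List.reverse_append]
      simp only [List.reverse_cons]
      rw [show l.reverse ++ ['_'] ++ pre.reverse = l.reverse ++ ('_' :: pre.reverse) by simp]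
      rw [tw_app _ _ _ hall]
      simp
    · rw [List.reverse_append]
      simp only [List.reverse_cons]
      rw [show l.reverse ++ ['_'] ++ pre.reverse = l.reverse ++ ('_' :: pre.reverse) by simp]
      rw [dw_app _ _ _ hall]
      simp
  · rintro ⟨ht, hd⟩
    rcases hde : cs.reverse.dropWhile (· ≠ '_') with _ | ⟨c, ds⟩
    · exact absurd hde hd
    · have hc : c = '_' := by
        have h2 := dropWhile_head_false _ _ _ _ hde
        simpa using h2
      subst hc
      have hsplit := List.takeWhile_append_dropWhile (p := fun c => decide (c ≠ '_')) (l := cs.reverse)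
      rw [hde, ht] at hsplit
      refine ⟨ds.reverse, ?_⟩
      have h3 := congrArg List.reverse hsplit
      simpa using h3

theorem ends_eq (key s : String) (l : List Char) (hs : s.toList = '_' :: l)
    (hl : ∀ c ∈ l, c ≠ '_') :
    PySem.Str.endswith key s =
      ((key.toList.reverse.takeWhile (· ≠ '_') == l.reverse) &&
       !(key.toList.reverse.dropWhile (· ≠ '_')).isEmpty) := by
  have h1 : PySem.Str.endswith key s = PySem.Chars.endswith key.toList s.toList := by simp
  rw [h1, hs]
  apply Bool.eq_iff_iff.mpr
  rw [PySem.Chars.endswith_iff key.toList ('_' :: l), suffix_iff _ _ hl]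
  simp

theorem sliceLen_eq (key s : String) (l : List Char) (hs : s.toList = '_' :: l) :
    (PySem.Str.slice key none (some (-(PySem.Str.len s : Int)))).toList =
      key.toList.take (key.toList.length - (l.length + 1)) := by
  have hlen : PySem.Str.len s = ((l.length + 1 : Nat) : Int) := by
    simp [hs]
  rw [hlen]
  have h2 := PySem.List.slice_to_neg_natCast key.toList (l.length + 1) (Nat.succ_pos _)
  simp only [PySem.Str.toList_slice, PySem.Chars.slice_eq_listSlice, h2]

theorem slice_head (key s : String) (l ds : List Char) (hs : s.toList = '_' :: l)
    (hcs : key.toList = ds.reverse ++ '_' :: l) :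
    PySem.Str.slice key none (some (-(PySem.Str.len s : Int))) = String.ofList ds.reverse := by
  have h4 := sliceLen_eq key s l hs
  rw [hcs] at h4
  have hlen2 : (ds.reverse ++ '_' :: l).length - (l.length + 1) = ds.reverse.length := by
    simp
  rw [hlen2, List.take_left] at h4
  have h5 := congrArg String.ofList h4
  rwa [String.ofList_toList] at h5

theorem ofList_rev_ne (t l : List Char) (s : String) (hsl : s.toList = l)
    (h : t ≠ l.reverse) : String.ofList t.reverse ≠ s := by
  intro he
  apply h
  have h2 := congrArg String.toList he
  rw [String.toList_ofList, hsl] at h2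
  have h3 := congrArg List.reverse h2
  simpa using h3

theorem main_eq (key : String) (fns : List String) :
    split_condition_key_py key fns = split_condition_key_py_alt key fns := by
  unfold split_condition_key_py split_condition_key_py_alt pvLOOKUPS pvRpartitionUnd
  simp only [pvALoop]
  rw [ends_eq key ("_" ++ "gte") ['g','t','e'] (by rfl) (by simp),
      ends_eq key ("_" ++ "lte") ['l','t','e'] (by rfl) (by simp),
      ends_eq key ("_" ++ "in") ['i','n'] (by rfl) (by simp),
      ends_eq key ("_" ++ "icontains") ['i','c','o','n','t','a','i','n','s'] (by rfl) (by simp),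
      ends_eq key ("_" ++ "exact") ['e','x','a','c','t'] (by rfl) (by simp)]
  rcases hde : key.toList.reverse.dropWhile (· ≠ '_') with _ | ⟨c, ds⟩
  · simp
  · have hc : c = '_' := by
      have h2 := dropWhile_head_false _ _ _ _ hde
      simpa using h2
    subst hc
    simp only [List.isEmpty_cons, Bool.not_false, Bool.and_true]
    set t := List.takeWhile (fun x => decide (x ≠ '_')) key.toList.reverse with htdef
    have hsplit := List.takeWhile_append_dropWhile (p := fun x => decide (x ≠ '_')) (l := key.toList.reverse)
    rw [hde, ← htdef] at hsplit
    have hcs0 : key.toList = ds.reverse ++ '_' :: t.reverse := by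
      have h3 := congrArg List.reverse hsplit
      simpa using h3.symm
    by_cases ht_gte : t = ['e','t','g']
    · have hcs' : key.toList = ds.reverse ++ '_' :: ['g','t','e'] := by rw [hcs0, ht_gte]; rfl
      rw [slice_head key ("_" ++ "gte") ['g','t','e'] ds rfl hcs', ht_gte]
      simp [pvLOOKUP_SET, PySem.Set.contains, PySem.Set.ofList]
    by_cases ht_lte : t = ['e','t','l']
    · have hcs' : key.toList = ds.reverse ++ '_' :: ['l','t','e'] := by rw [hcs0, ht_lte]; rfl
      rw [slice_head key ("_" ++ "lte") ['l','t','e'] ds rfl hcs', ht_lte]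
      simp [pvLOOKUP_SET, PySem.Set.contains, PySem.Set.ofList]
    by_cases ht_in : t = ['n','i']
    · have hcs' : key.toList = ds.reverse ++ '_' :: ['i','n'] := by rw [hcs0, ht_in]; rfl
      rw [slice_head key ("_" ++ "in") ['i','n'] ds rfl hcs', ht_in]
      simp [pvLOOKUP_SET, PySem.Set.contains, PySem.Set.ofList]
    by_cases ht_icontains : t = ['s','n','i','a','t','n','o','c','i']
    · have hcs' : key.toList = ds.reverse ++ '_' :: ['i','c','o','n','t','a','i','n','s'] := by rw [hcs0, ht_icontains]; rfl
      rw [slice_head key ("_" ++ "icontains") ['i','c','o','n','t','a','i','n','s'] ds rfl hcs', ht_icontains]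
      simp [pvLOOKUP_SET, PySem.Set.contains, PySem.Set.ofList]
    by_cases ht_exact : t = ['t','c','a','x','e']
    · have hcs' : key.toList = ds.reverse ++ '_' :: ['e','x','a','c','t'] := by rw [hcs0, ht_exact]; rfl
      rw [slice_head key ("_" ++ "exact") ['e','x','a','c','t'] ds rfl hcs', ht_exact]
      simp [pvLOOKUP_SET, PySem.Set.contains, PySem.Set.ofList]
    have hg1 : String.ofList t.reverse ≠ "gte" := ofList_rev_ne t ['g','t','e'] "gte" rfl (by simpa using ht_gte)
    have hg2 : String.ofList t.reverse ≠ "lte" := ofList_rev_ne t ['l','t','e'] "lte" rfl (by simpa using ht_lte)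
    have hg3 : String.ofList t.reverse ≠ "in" := ofList_rev_ne t ['i','n'] "in" rfl (by simpa using ht_in)
    have hg4 : String.ofList t.reverse ≠ "icontains" := ofList_rev_ne t ['i','c','o','n','t','a','i','n','s'] "icontains" rfl (by simpa using ht_icontains)
    have hg5 : String.ofList t.reverse ≠ "exact" := ofList_rev_ne t ['e','x','a','c','t'] "exact" rfl (by simpa using ht_exact)
    simp [ht_gte, ht_lte, ht_in, ht_icontains, ht_exact, hg1, hg2, hg3, hg4, hg5,
          pvLOOKUP_SET, PySem.Set.contains, PySem.Set.ofList]

-- ===== VERDICT (by name: the statement is the Claim_ definition above) =====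
theorem split_condition_key_py_spec : Claim_equal_split_condition_key_py := by
  intro key field_names _
  unfold Spec_split_condition_key_py
  exact main_eq key field_names
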